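-- pv_equiv track=rewrite | github.com/teraz1112/recursion | problem/intersectionOfArraysRepeats.py | intersectionOfArraysRepeats
-- ===== SOURCE A (Python) =====
-- def intersectionOfArraysRepeats(intList1, intList2):
--     hashTable = {}
--     for i in intList1:
--         # ハッシュテーブルのキーはリストの要素、値は出現回数
--         if i in hashTable:
--             hashTable[i] += 1
--         else:
--             hashTable[i] = 1
--     result = []
--     for i in intList2:
--         if i in hashTable and hashTable[i] > 0:
--             result.append(i)
--             hashTable[i] -= 1
--     # resultをソートして返す
--     return sorted(result)
-- ===== SOURCE B (Python) =====
-- def intersectionOfArraysRepeats(intList1, intList2):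
--     s1 = sorted(intList1)
--     s2 = sorted(intList2)
--     i = j = 0
--     result = []
--     while i < len(s1) and j < len(s2):
--         if s1[i] < s2[j]:
--             i += 1
--         elif s2[j] < s1[i]:
--             j += 1
--         else:
--             result.append(s1[i])
--             i += 1
--             j += 1
--     return result
-- ===== Notes on version B (the rewrite author's own statement) =====
-- stated objective: alternative
-- what changed: Replaced A's hash-counter-plus-stream-then-sort strategy with sorting both lists up front and a classic two-pointer merge that emits each common value min(count1,count2) times already in order.
import Mathlib
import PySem

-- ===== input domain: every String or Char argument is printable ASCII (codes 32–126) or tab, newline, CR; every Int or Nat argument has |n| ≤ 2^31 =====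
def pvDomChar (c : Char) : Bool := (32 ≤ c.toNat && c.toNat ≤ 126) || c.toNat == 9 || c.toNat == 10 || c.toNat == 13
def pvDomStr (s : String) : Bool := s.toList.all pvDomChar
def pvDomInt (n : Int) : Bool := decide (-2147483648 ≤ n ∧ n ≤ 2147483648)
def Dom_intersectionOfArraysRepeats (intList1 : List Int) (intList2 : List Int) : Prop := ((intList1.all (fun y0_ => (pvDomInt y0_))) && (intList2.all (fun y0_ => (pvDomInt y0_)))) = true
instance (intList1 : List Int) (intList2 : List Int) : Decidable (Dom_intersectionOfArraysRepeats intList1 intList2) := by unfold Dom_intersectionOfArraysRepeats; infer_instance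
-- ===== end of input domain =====

-- B replaces A's hash-counter + stream + final sort by sorting both inputs and a two-pointer
-- merge (objective: alternative algorithm of similar cost; neither mutates its arguments).

-- ===== PORT A =====
-- for i in intList2: if i in hashTable and hashTable[i] > 0: result.append(i); hashTable[i] -= 1
def pvStep2 (st : PySem.Dict Int Int × List Int) (i : Int) : PySem.Dict Int Int × List Int :=
  match st.1.get? i with
  | some c => if c > 0 then (st.1.insert i (c - 1), st.2 ++ [i]) else st
  | none => st

-- for i in intList1: if i in hashTable: hashTable[i] += 1 else: hashTable[i] = 1
def pvPhase1 (intList1 : List Int) : PySem.Dict Int Int :=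
  intList1.foldl
    (fun d i => match d.get? i with
      | some c => d.insert i (c + 1)
      | none => d.insert i 1) PySem.Dict.empty

def intersectionOfArraysRepeats (intList1 : List Int) (intList2 : List Int) : List Int :=
  let hashTable := pvPhase1 intList1
  let st := intList2.foldl pvStep2 (hashTable, [])
  PySem.List.sorted st.2 (fun x => x) false

-- ===== PORT B =====
-- the two-pointer while loop of Source B: advancing an index = dropping the head of that list
def pvMerge : List Int → List Int → List Int
  | [], _ => []
  | _ :: _, [] => []
  | a :: as, b :: bs =>
    if a < b then pvMerge as (b :: bs)
    else if b < a then pvMerge (a :: as) bs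
    else a :: pvMerge as bs
termination_by l1 l2 => l1.length + l2.length

def intersectionOfArraysRepeats_alt (intList1 : List Int) (intList2 : List Int) : List Int :=
  pvMerge (PySem.List.sorted intList1 (fun x => x) false) (PySem.List.sorted intList2 (fun x => x) false)

-- ===== PRECONDITION & SPEC =====
def Spec_intersectionOfArraysRepeats (intList1 : List Int) (intList2 : List Int) (out : List Int) : Prop := out = intersectionOfArraysRepeats_alt intList1 intList2
instance (intList1 : List Int) (intList2 : List Int) (out : List Int) : Decidable (Spec_intersectionOfArraysRepeats intList1 intList2 out) := by unfold Spec_intersectionOfArraysRepeats; infer_instance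

-- ===== CLAIM (what is proved, stated in full; the proofs are below) =====
def Claim_equal_intersectionOfArraysRepeats : Prop := ∀ (intList1 : List Int) (intList2 : List Int), Dom_intersectionOfArraysRepeats intList1 intList2 → Spec_intersectionOfArraysRepeats intList1 intList2 (intersectionOfArraysRepeats intList1 intList2)

-- ===== LEMMAS AND PROOFS =====

-- Phase 1 of A builds the counter of intList1.
lemma pvPhase1_getD (l : List Int) (v : Int) :
    (pvPhase1 l).getD v 0 = (l.count v : Int) := by
  unfold pvPhase1
  rw [PySem.List.foldl_congr_mem l _ (fun d i => d.insert i (d.getD i 0 + 1)) PySem.Dict.empty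
    (by
      intro d i _
      cases h : d.get? i with
      | some c => simp [h, PySem.Dict.getD_of_get?_eq_some d 0 h]
      | none => simp [PySem.Dict.getD_of_get?_eq_none d 0 h])]
  rw [PySem.Dict.getD_foldl_insert_add_one l PySem.Dict.empty v]
  simp

-- Phase 2 of A: the streamed result has count min(remaining budget, count in the stream).
lemma pvPhase2_count (l : List Int) (d : PySem.Dict Int Int) (res : List Int) (v : Int)
    (hnn : ∀ k, 0 ≤ d.getD k 0) :
    ((l.foldl pvStep2 (d, res)).2).count v
      = res.count v + min (d.getD v 0).toNat (l.count v) := by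
  induction l generalizing d res with
  | nil => simp
  | cons i t ih =>
    simp only [List.foldl_cons]
    cases h : d.get? i with
    | none =>
      have hz : d.getD i 0 = 0 := PySem.Dict.getD_of_get?_eq_none d 0 h
      simp only [pvStep2, h]
      rw [ih d res hnn]
      by_cases hv : i = v
      · subst hv; simp [List.count_cons_self, hz]
      · rw [List.count_cons_of_ne hv]
    | some c =>
      have hc : d.getD i 0 = c := PySem.Dict.getD_of_get?_eq_some d 0 h
      by_cases hpos : c > 0
      · simp only [pvStep2, h, if_pos hpos]
        have hnn' : ∀ k, 0 ≤ (d.insert i (c - 1)).getD k 0 := by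
          intro k
          rw [PySem.Dict.getD_insert]
          split
          · omega
          · exact hnn k
        rw [ih (d.insert i (c - 1)) (res ++ [i]) hnn']
        by_cases hv : i = v
        · subst hv
          rw [PySem.Dict.getD_insert_self, List.count_cons_self, hc]
          simp [List.count_append]
          omega
        · rw [PySem.Dict.getD_insert_of_ne d (c - 1) 0 (fun hh => hv (Eq.symm hh)),
            List.count_cons_of_ne hv]
          simp [List.count_append, hv]
      · have hz : c = 0 := le_antisymm (by omega) (by have := hnn i; omega)
        simp only [pvStep2, h, if_neg hpos]
        rw [ih d res hnn]
        by_cases hv : i = v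
        · subst hv; simp [List.count_cons_self, hc, hz]
        · rw [List.count_cons_of_ne hv]

-- A's pre-sort stream holds each value min(count1, count2) times.
lemma pvStream_count (l1 l2 : List Int) (v : Int) :
    ((l2.foldl pvStep2 (pvPhase1 l1, [])).2).count v
      = min (l1.count v) (l2.count v) := by
  rw [pvPhase2_count _ _ _ _ (fun k => by rw [pvPhase1_getD]; positivity)]
  rw [pvPhase1_getD]
  simp

-- Every element of the merge comes from the left list.
lemma pvMerge_mem_left {x : Int} : ∀ (l1 l2 : List Int), x ∈ pvMerge l1 l2 → x ∈ l1
  | [], _, h => by simp [pvMerge] at h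
  | _ :: _, [], h => by simp [pvMerge] at h
  | a :: as, b :: bs, h => by
    rw [pvMerge] at h
    split_ifs at h with h1 h2
    · exact List.mem_cons_of_mem a (pvMerge_mem_left as (b :: bs) h)
    · exact pvMerge_mem_left (a :: as) bs h
    · rcases List.mem_cons.1 h with h | h
      · simp [h]
      · exact List.mem_cons_of_mem a (pvMerge_mem_left as bs h)
termination_by l1 l2 => l1.length + l2.length

lemma pvMerge_mem_right {x : Int} : ∀ (l1 l2 : List Int), x ∈ pvMerge l1 l2 → x ∈ l2
  | [], _, h => by simp [pvMerge] at h
  | _ :: _, [], h => by simp [pvMerge] at h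
  | a :: as, b :: bs, h => by
    rw [pvMerge] at h
    split_ifs at h with h1 h2
    · exact pvMerge_mem_right as (b :: bs) h
    · exact List.mem_cons_of_mem b (pvMerge_mem_right (a :: as) bs h)
    · rcases List.mem_cons.1 h with h | h
      · have : a = b := le_antisymm (not_lt.1 h2) (not_lt.1 h1)
        simp [h, this]
      · exact List.mem_cons_of_mem b (pvMerge_mem_right as bs h)
termination_by l1 l2 => l1.length + l2.length

-- On sorted inputs the merge realises the multiset min of the counts.
lemma pvMerge_count : ∀ (l1 l2 : List Int), l1.Pairwise (· ≤ ·) → l2.Pairwise (· ≤ ·) →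
    ∀ v, (pvMerge l1 l2).count v = min (l1.count v) (l2.count v)
  | [], l2, _, _, v => by simp [pvMerge]
  | _ :: _, [], _, _, v => by simp [pvMerge]
  | a :: as, b :: bs, h1, h2, v => by
    rw [List.pairwise_cons] at h1 h2
    rw [pvMerge]
    split_ifs with hab hba
    · -- a < b : a occurs nowhere in b :: bs
      rw [pvMerge_count as (b :: bs) h1.2 (List.pairwise_cons.2 h2)]
      by_cases hv : a = v
      · subst hv
        have hnot : a ∉ b :: bs := by
          intro hm
          rcases List.mem_cons.1 hm with h | h
          · omega
          · have := h2.1 a h; omega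
        simp [List.count_eq_zero_of_not_mem hnot]
      · rw [List.count_cons_of_ne hv]
    · -- b < a : b occurs nowhere in a :: as
      rw [pvMerge_count (a :: as) bs (List.pairwise_cons.2 h1) h2.2]
      by_cases hv : b = v
      · subst hv
        have hnot : b ∉ a :: as := by
          intro hm
          rcases List.mem_cons.1 hm with h | h
          · omega
          · have := h1.1 b h; omega
        simp [List.count_eq_zero_of_not_mem hnot]
      · rw [List.count_cons_of_ne hv]
    · have heq : a = b := le_antisymm (not_lt.1 hba) (not_lt.1 hab)
      subst heq
      by_cases hv : a = v
      · subst hv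
        simp only [List.count_cons_self, pvMerge_count as bs h1.2 h2.2]
        omega
      · simp only [List.count_cons_of_ne hv, pvMerge_count as bs h1.2 h2.2]
termination_by l1 l2 => l1.length + l2.length

-- The merge of two sorted lists is sorted.
lemma pvMerge_pairwise : ∀ (l1 l2 : List Int), l1.Pairwise (· ≤ ·) → l2.Pairwise (· ≤ ·) →
    (pvMerge l1 l2).Pairwise (· ≤ ·)
  | [], _, _, _ => by simp [pvMerge]
  | _ :: _, [], _, _ => by simp [pvMerge]
  | a :: as, b :: bs, h1, h2 => by
    rw [pvMerge]
    split_ifs with hab hba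
    · exact pvMerge_pairwise as (b :: bs) ((List.pairwise_cons.1 h1).2) h2
    · exact pvMerge_pairwise (a :: as) bs h1 ((List.pairwise_cons.1 h2).2)
    · have heq : a = b := le_antisymm (not_lt.1 hba) (not_lt.1 hab)
      rw [List.pairwise_cons] at h1 h2
      refine List.pairwise_cons.2 ⟨?_, pvMerge_pairwise as bs h1.2 h2.2⟩
      intro x hx
      have := h2.1 x (pvMerge_mem_right as bs hx); omega
termination_by l1 l2 => l1.length + l2.length

-- ===== VERDICT (by name: the statement is the Claim_ definition above) =====
theorem intersectionOfArraysRepeats_spec : Claim_equal_intersectionOfArraysRepeats := by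
  intro l1 l2 _
  show _ = _
  unfold intersectionOfArraysRepeats intersectionOfArraysRepeats_alt
  have hp1 := PySem.List.sorted_pairwise (xs := l1) (key := fun x : Int => x)
  have hp2 := PySem.List.sorted_pairwise (xs := l2) (key := fun x : Int => x)
  set s1 := PySem.List.sorted l1 (fun x => x) false with hs1
  set s2 := PySem.List.sorted l2 (fun x => x) false with hs2
  have hperm : (pvMerge s1 s2).Perm
      ((l2.foldl pvStep2 (pvPhase1 l1, [])).2) := by
    rw [List.perm_iff_count]
    intro v
    rw [pvMerge_count s1 s2 hp1 hp2 v, pvStream_count l1 l2 v,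
      (PySem.List.sorted_perm (xs := l1) (key := fun x : Int => x) (rev := false)).count_eq,
      (PySem.List.sorted_perm (xs := l2) (key := fun x : Int => x) (rev := false)).count_eq]
  exact PySem.List.sorted_id_eq_of_perm_of_pairwise _ _ hperm
    (pvMerge_pairwise s1 s2 hp1 hp2)
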